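-- pv_equiv track=rewrite | github.com/youthHan/molmoact | olmo/util.py | split_dict_of_list
-- ===== SOURCE A (Python) =====
-- def split_dict_of_list(batch, split_size):
--     out = None
--     for key, val in batch.items():
--         parts = split_list(val, split_size)
--         if out is None:
--             out = [{key: part} for part in parts]
--         else:
--             assert len(out) == len(parts)
--             for out_dict, part in zip(out, parts):
--                 out_dict[key] = part
--     return out
--
-- def split_list(lst, split_size):
--     assert len(lst) % split_size == 0
--     n = len(lst) // split_size
--     return [lst[i*split_size:(i+1)*split_size] for i in range(n)]
-- ===== SOURCE B (Python) =====
-- def split_dict_of_list(batch, split_size):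
--     if not batch:
--         return None
--     vals = list(batch.values())
--     n = len(vals[0]) // split_size
--     for val in vals:
--         assert len(val) % split_size == 0
--         assert len(val) // split_size == n
--     return [{key: val[i * split_size:(i + 1) * split_size] for key, val in batch.items()}
--             for i in range(n)]
-- ===== Notes on version B (the rewrite author's own statement) =====
-- stated objective: alternative
-- what changed: Inverted the loop nesting: instead of A's key-major fold that threads an Option accumulator and mutates each chunk-dict per key, B validates all lengths up front and builds each chunk-dict directly, chunk-major, as one dict comprehension per range index; Pre_ excludes the empty dict (A returns None, not a list) and values of unequal length, where for negative split_size A accidentally returns [] (every chunk count is nonpositive so its per-chunk assert never compares counts) while B's up-front equal-chunk-count assert raises.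
-- outside the precondition, e.g. on split_dict_of_list({}, 2): A returns None, B returns None; on split_dict_of_list({'a': [-1], 'b': [2, 3, 4]}, -1): A returns [], B raises AssertionError
import Mathlib
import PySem

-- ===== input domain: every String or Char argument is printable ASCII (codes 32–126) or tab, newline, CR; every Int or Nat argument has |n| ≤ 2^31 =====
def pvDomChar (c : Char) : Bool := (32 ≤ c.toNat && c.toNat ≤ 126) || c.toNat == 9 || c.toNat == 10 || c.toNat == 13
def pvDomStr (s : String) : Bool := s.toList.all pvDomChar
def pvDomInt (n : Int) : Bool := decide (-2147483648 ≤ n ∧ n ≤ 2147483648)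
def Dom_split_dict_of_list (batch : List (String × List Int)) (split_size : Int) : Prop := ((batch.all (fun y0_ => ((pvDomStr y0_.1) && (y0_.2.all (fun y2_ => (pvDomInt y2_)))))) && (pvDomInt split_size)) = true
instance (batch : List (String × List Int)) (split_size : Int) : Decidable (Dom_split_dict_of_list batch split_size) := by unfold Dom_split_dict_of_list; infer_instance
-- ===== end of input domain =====

-- B inverts A's loop nesting (chunk-major dict comprehension instead of key-major fold that
-- mutates chunk dicts); same cost, different decomposition. Return-value equivalence only.

-- ===== PORT A =====
-- helper split_list of A, literal
def split_list_port (lst : List Int) (split_size : Int) : List (List Int) :=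
  let n := PySem.Int.floordiv (lst.length : Int) split_size
  (PySem.List.pyRange 0 n 1).map
    (fun i => PySem.List.slice lst (some (i * split_size)) (some ((i + 1) * split_size)))

-- A's key-major fold; the inner dicts are PySem.Dict, converted to items lists at the end.
-- Python returns None on an empty dict (no value of the result type): excluded by Pre_,
-- the port returns [] there.
def split_dict_of_list (batch : List (String × List Int)) (split_size : Int) :
    List (List (String × List Int)) :=
  let out : Option (List (PySem.Dict String (List Int))) :=
    batch.foldl
      (fun out kv =>
        let parts := split_list_port kv.2 split_size
        match out with
        | none => some (parts.map (fun part => PySem.Dict.empty.insert kv.1 part))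
        | some o => some ((o.zip parts).map (fun dp => dp.1.insert kv.1 dp.2)))
      none
  match out with
  | none => []
  | some o => o.map (fun d => d.items)

-- ===== PORT B =====
-- chunk-major: one dict (association list, distinct keys by Pre_) per chunk index
def split_dict_of_list_alt (batch : List (String × List Int)) (split_size : Int) :
    List (List (String × List Int)) :=
  match batch with
  | [] => []   -- Python B returns None here; excluded by Pre_
  | kv0 :: _ =>
    let n := PySem.Int.floordiv (kv0.2.length : Int) split_size
    (PySem.List.pyRange 0 n 1).map
      (fun i => batch.map
        (fun kv => (kv.1, PySem.List.slice kv.2 (some (i * split_size)) (some ((i + 1) * split_size)))))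

-- ===== PRECONDITION & SPEC =====
-- Pre_ excludes: the empty dict (A returns None, not a list); split_size = 0 (ZeroDivisionError);
-- a value whose length is not divisible by split_size (AssertionError); values of unequal
-- length, where A raises AssertionError for positive split_size but for negative split_size
-- accidentally returns [] (all chunk counts nonpositive, so its count-equality assert never
-- fires) while B's up-front count assert raises; and association lists with duplicate keys,
-- which cannot arise from a Python dict and on which the assoc-list model is ambiguous.
def Pre_split_dict_of_list (batch : List (String × List Int)) (split_size : Int) : Prop :=
  batch ≠ [] ∧ (batch.map Prod.fst).Nodup ∧ split_size ≠ 0 ∧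
    ∀ p ∈ batch, PySem.Int.mod (p.2.length : Int) split_size = 0 ∧
      p.2.length = batch.headI.2.length
instance (batch : List (String × List Int)) (split_size : Int) :
    Decidable (Pre_split_dict_of_list batch split_size) := by
  unfold Pre_split_dict_of_list; infer_instance

def pvWitness_split_dict_of_list : (List (String × List Int)) × Int :=
  ([("a", [1, 2, 3, 4]), ("b", [5, 6, 7, 8])], 2)

def Spec_split_dict_of_list (batch : List (String × List Int)) (split_size : Int)
    (out : List (List (String × List Int))) : Prop := out = split_dict_of_list_alt batch split_size
instance (batch : List (String × List Int)) (split_size : Int)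
    (out : List (List (String × List Int))) : Decidable (Spec_split_dict_of_list batch split_size out) := by
  unfold Spec_split_dict_of_list; infer_instance

-- ===== CLAIM (what is proved, stated in full; the proofs are below) =====
def Claim_equal_split_dict_of_list : Prop := ∀ (batch : List (String × List Int)) (split_size : Int), Dom_split_dict_of_list batch split_size → Pre_split_dict_of_list batch split_size → Spec_split_dict_of_list batch split_size (split_dict_of_list batch split_size)

-- ===== LEMMAS AND PROOFS =====

-- chunk i of the processed prefix, as a Dict
def pvChunk (pref : List (String × List Int)) (s i : Int) : PySem.Dict String (List Int) :=
  PySem.Dict.mk (pref.map (fun kv =>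
    (kv.1, PySem.List.slice kv.2 (some (i * s)) (some ((i + 1) * s)))))

theorem pvInsert_append {k : String} {v : List Int} (l : List (String × List Int))
    (hk : k ∉ l.map Prod.fst) :
    (PySem.Dict.mk l).insert k v = PySem.Dict.mk (l ++ [(k, v)]) := by
  have hc : (PySem.Dict.mk l).contains k = false := by
    rw [PySem.Dict.contains_eq_decide_mem_keys]
    simp only [PySem.Dict.keys_mk, decide_eq_false_iff_not]
    simpa using hk
  apply PySem.Dict.ext
  simp [PySem.Dict.items_insert, hc]

theorem pvFold_invariant (s n : Int) (L : Nat) (rest : List (String × List Int))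
    (hlen : ∀ p ∈ rest, (p.2.length : Int) = (L : Int))
    (hn : PySem.Int.floordiv (L : Int) s = n) :
    ∀ pref : List (String × List Int),
      ((pref ++ rest).map Prod.fst).Nodup →
      rest.foldl
        (fun out kv =>
          let parts := split_list_port kv.2 s
          match out with
          | none => some (parts.map (fun part => PySem.Dict.empty.insert kv.1 part))
          | some o => some ((o.zip parts).map (fun dp => dp.1.insert kv.1 dp.2)))
        (some ((PySem.List.pyRange 0 n 1).map (fun i => pvChunk pref s i)))
      = some ((PySem.List.pyRange 0 n 1).map (fun i => pvChunk (pref ++ rest) s i)) := by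
  induction rest with
  | nil => intro pref _; simp
  | cons kv rest ih =>
    intro pref hnd
    have hkvlen : (kv.2.length : Int) = (L : Int) := hlen kv (by simp)
    have hparts : split_list_port kv.2 s
        = (PySem.List.pyRange 0 n 1).map
            (fun i => PySem.List.slice kv.2 (some (i * s)) (some ((i + 1) * s))) := by
      unfold split_list_port
      rw [hkvlen, hn]
    have hknotin : kv.1 ∉ pref.map Prod.fst := by
      have hnd' := hnd
      rw [List.map_append] at hnd'
      have hd := List.disjoint_of_nodup_append hnd'
      intro hmem
      exact hd hmem (by simp)
    have hstep :
        ((((PySem.List.pyRange 0 n 1).map (fun i => pvChunk pref s i)).zip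
            ((PySem.List.pyRange 0 n 1).map
              (fun i => PySem.List.slice kv.2 (some (i * s)) (some ((i + 1) * s))))).map
          (fun dp => dp.1.insert kv.1 dp.2))
        = (PySem.List.pyRange 0 n 1).map (fun i => pvChunk (pref ++ [kv]) s i) := by
      rw [List.zip_map']
      rw [List.map_map]
      apply List.map_congr_left
      intro i _
      simp only [Function.comp]
      have hk : kv.1 ∉ (pref.map (fun kv =>
          (kv.1, PySem.List.slice kv.2 (some (i * s)) (some ((i + 1) * s))))).map Prod.fst := by
        simpa using hknotin
      unfold pvChunk
      rw [pvInsert_append _ hk]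
      simp
    simp only [List.foldl_cons]
    rw [hparts, hstep]
    have := ih (by intro p hp; exact hlen p (by simp [hp]))
      (pref ++ [kv]) (by simpa using hnd)
    simpa using this

-- ===== VERDICT (by name: the statement is the Claim_ definition above) =====
theorem split_dict_of_list_spec : Claim_equal_split_dict_of_list := by
  intro batch s _ hpre
  obtain ⟨hne, hnd, hs, hall⟩ := hpre
  unfold Spec_split_dict_of_list
  cases batch with
  | nil => exact absurd rfl hne
  | cons kv0 rest =>
    unfold split_dict_of_list split_dict_of_list_alt
    simp only [List.foldl_cons]
    have hparts0 : split_list_port kv0.2 s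
        = (PySem.List.pyRange 0 (PySem.Int.floordiv (kv0.2.length : Int) s) 1).map
            (fun i => PySem.List.slice kv0.2 (some (i * s)) (some ((i + 1) * s))) := rfl
    have hfirst : (split_list_port kv0.2 s).map (fun part => PySem.Dict.empty.insert kv0.1 part)
        = (PySem.List.pyRange 0 (PySem.Int.floordiv (kv0.2.length : Int) s) 1).map
            (fun i => pvChunk [kv0] s i) := by
      rw [hparts0, List.map_map]
      apply List.map_congr_left
      intro i _
      simp only [Function.comp]
      apply PySem.Dict.ext
      simp [PySem.Dict.items_insert, pvChunk, PySem.Dict.empty]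
    have hinv := pvFold_invariant s (PySem.Int.floordiv (kv0.2.length : Int) s) kv0.2.length rest
      (by intro p hp
          have := (hall p (by simp [hp])).2
          simp only [List.headI] at this
          exact_mod_cast this)
      rfl [kv0] (by simpa using hnd)
    rw [hfirst, hinv]
    show (List.map (fun i => pvChunk ([kv0] ++ rest) s i)
        (PySem.List.pyRange 0 (PySem.Int.floordiv (kv0.2.length : Int) s) 1)).map
        (fun d => d.items) = _
    rw [List.map_map]
    apply List.map_congr_left
    intro i _
    simp [pvChunk]
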